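-- pv_equiv track=rewrite | github.com/salamann/twitter_aichi_covid19 | html_gen.py | generate_ranking_text
-- ===== SOURCE A (Python) =====
-- def generate_ranking_text(data_dict):
--     rank = 0
--     ranking = "<li>"
--     is_same = False
--     current_num = -1
--
--     for city, num in data_dict.items():
--         if current_num == num:
--             is_same = True
--         else:
--             ranking += "</li>\n<li>"
--             rank += 1
--             is_same = False
--         if not is_same:
--             ranking += f"{rank}位 {num}人 {city}"
--             current_num = num
--         else:
--             ranking += f", {city}"
--     return ranking[9:] + "</li>"
-- ===== SOURCE B (Python) =====
-- def generate_ranking_text(data_dict):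
--     # group consecutive entries sharing the same value
--     groups = []
--     for city, num in data_dict.items():
--         if groups and groups[-1][0] == num:
--             groups[-1][1].append(city)
--         else:
--             groups.append((num, [city]))
--     # one <li> line per group, numbered from 1
--     return "".join(
--         f"\n<li>{rank}位 {num}人 {', '.join(cities)}</li>"
--         for rank, (num, cities) in enumerate(groups, 1)
--     )
-- ===== Notes on version B (the rewrite author's own statement) =====
-- stated objective: alternative
-- what changed: B first partitions the items into groups of consecutive entries with the same value and then formats one <li> line per group, instead of A's single pass with a running is_same flag, a phantom leading <li> and a [9:] slice repair.
-- intended difference: On the empty dict and on inputs whose first value is -1 (which spuriously matches A's sentinel current_num=-1), A's slice repair mangles the output (e.g. '</li>' for {} or {'a': -1}); B returns the natural ranking ('' for the empty dict, and the leading run rendered as rank 1 otherwise), which is the intended value. — e.g. on generate_ranking_text([("a", -1)]): A returns "</li>", B returns "\n<li>1位 -1人 a</li>"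
import Mathlib
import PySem

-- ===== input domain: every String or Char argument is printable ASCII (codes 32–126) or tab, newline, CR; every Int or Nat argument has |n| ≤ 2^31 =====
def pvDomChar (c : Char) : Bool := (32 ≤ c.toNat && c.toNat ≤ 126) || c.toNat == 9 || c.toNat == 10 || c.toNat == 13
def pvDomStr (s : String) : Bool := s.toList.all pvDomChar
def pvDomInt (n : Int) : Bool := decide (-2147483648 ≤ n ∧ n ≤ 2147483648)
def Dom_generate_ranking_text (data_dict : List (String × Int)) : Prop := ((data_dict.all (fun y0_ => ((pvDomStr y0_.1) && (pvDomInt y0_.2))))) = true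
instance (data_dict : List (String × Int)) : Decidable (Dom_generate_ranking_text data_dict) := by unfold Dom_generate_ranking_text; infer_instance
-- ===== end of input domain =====

-- B groups consecutive equal values first and then formats one <li> per group, instead of A's
-- single running-flag pass followed by a [9:] slice repair; objective: alternative decomposition.

-- ===== PORT A =====
-- one loop iteration of A: state = (rank, ranking, is_same, current_num)
def grtStepA (st : Int × String × Bool × Int) (cn : String × Int) : Int × String × Bool × Int :=
  if st.2.2.2 == cn.2 then
    -- is_same = True; ranking += f", {city}"
    (st.1, st.2.1 ++ ", " ++ cn.1, true, st.2.2.2)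
  else
    -- ranking += "</li>\n<li>"; rank += 1; ranking += f"{rank}位 {num}人 {city}"; current_num = num
    (st.1 + 1,
     st.2.1 ++ "</li>\n<li>" ++ PySem.Int.toStr (st.1 + 1) ++ "位 " ++ PySem.Int.toStr cn.2 ++ "人 " ++ cn.1,
     false, cn.2)

def generate_ranking_text (data_dict : List (String × Int)) : String :=
  let st := data_dict.foldl grtStepA (0, "<li>", false, -1)
  PySem.Str.slice st.2.1 (some 9) none ++ "</li>"   -- return ranking[9:] + "</li>"

-- ===== PORT B =====
-- loop body: 'if groups and groups[-1][0] == num: append city to last group else start a new group'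
def grtStepB (gs : List (Int × List String)) (cn : String × Int) : List (Int × List String) :=
  match gs.getLast? with
  | some g => if g.1 == cn.2 then gs.dropLast ++ [(g.1, g.2 ++ [cn.1])] else gs ++ [(cn.2, [cn.1])]
  | none => gs ++ [(cn.2, [cn.1])]

-- f"\n<li>{rank}位 {num}人 {', '.join(cities)}</li>"
def grtLine (r : Int) (g : Int × List String) : String :=
  "\n<li>" ++ PySem.Int.toStr r ++ "位 " ++ PySem.Int.toStr g.1 ++ "人 " ++ PySem.Str.join ", " g.2 ++ "</li>"

-- the generator with enumerate(groups, 1)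
def grtLines : Int → List (Int × List String) → List String
  | _, [] => []
  | r, g :: gs => grtLine r g :: grtLines (r + 1) gs

def generate_ranking_text_alt (data_dict : List (String × Int)) : String :=
  let groups := data_dict.foldl grtStepB []
  PySem.Str.join "" (grtLines 1 groups)   -- "".join(...)

-- ===== PRECONDITION & SPEC =====
-- On the empty dict and on inputs whose first value is -1 (which spuriously matches A's sentinel
-- current_num = -1), A's [9:] slice repair mangles the output (e.g. "</li>" for {} or {'a': -1});
-- B returns the natural ranking ("" for the empty dict, and the leading run as rank 1 otherwise),
-- which is the intended value.
def D_generate_ranking_text (data_dict : List (String × Int)) : Prop :=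
  data_dict = [] ∨ data_dict.head?.map (fun p => p.2) = some (-1)
instance (data_dict : List (String × Int)) : Decidable (D_generate_ranking_text data_dict) := by
  unfold D_generate_ranking_text; infer_instance

def Spec_generate_ranking_text (data_dict : List (String × Int)) (out : String) : Prop :=
  ¬ D_generate_ranking_text data_dict → out = generate_ranking_text_alt data_dict
instance (data_dict : List (String × Int)) (out : String) : Decidable (Spec_generate_ranking_text data_dict out) := by
  unfold Spec_generate_ranking_text; infer_instance

def pvDiffWitness_generate_ranking_text : (List (String × Int)) := [("a", -1)]
def pvDiffWitnessOut_generate_ranking_text : String × String := ("</li>", "\n<li>1位 -1人 a</li>")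

-- ===== CLAIM (what is proved, stated in full; the proofs are below) =====
def Claim_unchanged_generate_ranking_text : Prop := ∀ (data_dict : List (String × Int)), Dom_generate_ranking_text data_dict → Spec_generate_ranking_text data_dict (generate_ranking_text data_dict)
def Claim_changed_generate_ranking_text : Prop := Dom_generate_ranking_text (pvDiffWitness_generate_ranking_text) ∧ D_generate_ranking_text (pvDiffWitness_generate_ranking_text) ∧ generate_ranking_text (pvDiffWitness_generate_ranking_text) = pvDiffWitnessOut_generate_ranking_text.1 ∧ generate_ranking_text_alt (pvDiffWitness_generate_ranking_text) = pvDiffWitnessOut_generate_ranking_text.2 ∧ pvDiffWitnessOut_generate_ranking_text.1 ≠ pvDiffWitnessOut_generate_ranking_text.2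

-- ===== LEMMAS AND PROOFS =====

-- string plumbing ------------------------------------------------------------
theorem pvStrCancel (s t u : String) (h : s ++ t = s ++ u) : t = u := by
  apply String.toList_inj.mp
  have := congrArg String.toList h
  simp only [String.toList_append] at this
  exact List.append_cancel_left this

theorem pvJoin_cons (sep x y : String) (ls : List String) :
    PySem.Str.join sep (x :: y :: ls) = x ++ sep ++ PySem.Str.join sep (y :: ls) := by
  apply String.toList_inj.mp
  simp [PySem.Str.toList_join, PySem.Chars.join_cons_cons, String.toList_append]

theorem pvJoin_single (sep x : String) : PySem.Str.join sep [x] = x := by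
  apply String.toList_inj.mp
  simp [PySem.Str.toList_join, PySem.Chars.join_singleton]

theorem pvJoin_append_single (sep c : String) (cs : List String) (h : cs ≠ []) :
    PySem.Str.join sep (cs ++ [c]) = PySem.Str.join sep cs ++ sep ++ c := by
  induction cs with
  | nil => exact absurd rfl h
  | cons x tl ih =>
    cases tl with
    | nil => simp [pvJoin_cons, pvJoin_single]
    | cons y tl' =>
      have hih := ih (by simp)
      simp only [List.cons_append] at hih ⊢
      rw [pvJoin_cons, hih, pvJoin_cons]
      simp [String.append_assoc]

theorem pvSlice9 (R : String) :
    PySem.Str.slice ("<li>" ++ ("</li>" ++ R)) (some 9) none = R := by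
  apply String.toList_inj.mp
  have h1 : ("<li>" ++ ("</li>" ++ R)).toList
      = (['<','l','i','>','<','/','l','i','>'] : List Char) ++ R.toList := by
    simp [String.toList_append]
  have h9 : ((9 : Int)) = (((9 : Nat) : Int)) := rfl
  rw [PySem.Str.toList_slice]
  simp only [PySem.Chars.slice_eq_listSlice]
  rw [h1, h9, PySem.List.slice_from_natCast]
  rfl

-- the canonical per-item recursion A's loop implements ------------------------
def pvBody (r n : Int) (cs : List String) : String :=
  PySem.Int.toStr r ++ "位 " ++ PySem.Int.toStr n ++ "人 " ++ PySem.Str.join ", " cs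

def pvHdr (r n : Int) (cs : List String) : String :=
  "</li>\n<li>" ++ pvBody r n cs

def pvCanon : Int → Int → List (String × Int) → String
  | _, _, [] => ""
  | r, cur, cn :: t =>
    if cur == cn.2 then ", " ++ cn.1 ++ pvCanon r cur t
    else "</li>\n<li>" ++ PySem.Int.toStr (r + 1) ++ "位 " ++ PySem.Int.toStr cn.2 ++ "人 " ++ cn.1
         ++ pvCanon (r + 1) cn.2 t

theorem pvFoldA (xs : List (String × Int)) : ∀ (r : Int) (s : String) (b : Bool) (cur : Int),
    (xs.foldl grtStepA (r, s, b, cur)).2.1 = s ++ pvCanon r cur xs := by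
  induction xs with
  | nil => intro r s b cur; simp [pvCanon]
  | cons cn t ih =>
    intro r s b cur
    by_cases h : cur = cn.2
    · simp [List.foldl_cons, grtStepA, h, pvCanon, ih, String.append_assoc]
    · simp [List.foldl_cons, grtStepA, h, pvCanon, ih, String.append_assoc]

-- B's grouping pass as a recursion -------------------------------------------
def pvGrp : Int → List String → List (String × Int) → List (Int × List String)
  | n, cs, [] => [(n, cs)]
  | n, cs, cn :: t => if cn.2 == n then pvGrp n (cs ++ [cn.1]) t else (n, cs) :: pvGrp cn.2 [cn.1] t

theorem pvFoldB (t : List (String × Int)) : ∀ (gs : List (Int × List String)) (n : Int) (cs : List String),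
    t.foldl grtStepB (gs ++ [(n, cs)]) = gs ++ pvGrp n cs t := by
  induction t with
  | nil => intro gs n cs; simp [pvGrp]
  | cons cn t ih =>
    intro gs n cs
    by_cases h : n = cn.2
    · rw [List.foldl_cons]
      have hs : grtStepB (gs ++ [(n, cs)]) cn = gs ++ [(n, cs ++ [cn.1])] := by
        simp [grtStepB, List.getLast?_append, h]
      rw [hs, ih]
      simp [pvGrp, h]
    · rw [List.foldl_cons]
      have hs : grtStepB (gs ++ [(n, cs)]) cn = (gs ++ [(n, cs)]) ++ [(cn.2, [cn.1])] := by
        simp [grtStepB, List.getLast?_append, h]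
      rw [hs, ih]
      simp [pvGrp, Ne.symm h]

theorem pvGrp_ne_nil (t : List (String × Int)) : ∀ (n : Int) (cs : List String), pvGrp n cs t ≠ [] := by
  induction t with
  | nil => intro n cs; simp [pvGrp]
  | cons cn t ih =>
    intro n cs
    by_cases h : cn.2 = n <;> simp [pvGrp, h, ih]

-- rendering of the groups ----------------------------------------------------
def pvRender : Int → List (Int × List String) → String
  | _, [] => ""
  | r, g :: gs => pvHdr (r + 1) g.1 g.2 ++ pvRender (r + 1) gs

theorem pvCanon_render (t : List (String × Int)) : ∀ (r n : Int) (cs : List String), cs ≠ [] →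
    pvHdr (r + 1) n cs ++ pvCanon (r + 1) n t = pvRender r (pvGrp n cs t) := by
  induction t with
  | nil => intro r n cs _; simp [pvCanon, pvGrp, pvRender]
  | cons cn t ih =>
    intro r n cs hcs
    by_cases h : n = cn.2
    · subst h
      simp only [pvCanon, pvGrp, beq_self_eq_true, if_true]
      rw [← ih r cn.2 (cs ++ [cn.1]) (by simp)]
      simp only [pvHdr, pvBody, pvJoin_append_single ", " cn.1 cs hcs, ← String.append_assoc]
    · have hb : (cn.2 == n) = false := by simp [Ne.symm h]
      have hb2 : (n == cn.2) = false := by simp [h]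
      simp only [pvCanon, pvGrp, hb, hb2, Bool.false_eq_true, if_false]
      rw [pvRender, ← ih (r + 1) cn.2 [cn.1] (by simp)]
      simp only [pvHdr, pvBody, pvJoin_single, ← String.append_assoc]

theorem pvRender_lines (gs : List (Int × List String)) : ∀ (r : Int), gs ≠ [] →
    pvRender r gs ++ "</li>" = "</li>" ++ PySem.Str.join "" (grtLines (r + 1) gs) := by
  induction gs with
  | nil => intro r h; exact absurd rfl h
  | cons g gs ih =>
    intro r _
    cases gs with
    | nil =>
      simp [pvRender, grtLines, pvJoin_single, grtLine, pvHdr, pvBody, ← String.append_assoc]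
    | cons g' gs' =>
      have hih := ih (r + 1) (by simp)
      rw [pvRender, String.append_assoc, hih]
      rw [show grtLines (r + 1) (g :: g' :: gs') = grtLine (r + 1) g :: grtLines (r + 1 + 1) (g' :: gs') from rfl]
      rw [show grtLines (r + 1 + 1) (g' :: gs') = grtLine (r + 1 + 1) g' :: grtLines (r + 1 + 1 + 1) gs' from rfl]
      rw [pvJoin_cons]
      simp [pvHdr, pvBody, grtLine, ← String.append_assoc]

theorem pvRender_head (gs : List (Int × List String)) (r : Int) (h : gs ≠ []) :
    ∃ Z : String, pvRender r gs = "</li>" ++ Z := by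
  cases gs with
  | nil => exact absurd rfl h
  | cons g gs' =>
    refine ⟨"\n" ++ "<li>" ++ (pvBody (r + 1) g.1 g.2 ++ pvRender (r + 1) gs'), ?_⟩
    simp [pvRender, pvHdr, ← String.append_assoc]

-- ===== VERDICT (by name: the statement is the Claim_ definition above) =====
theorem generate_ranking_text_spec : Claim_unchanged_generate_ranking_text := by
  intro data_dict _
  unfold Spec_generate_ranking_text
  intro hnd
  cases data_dict with
  | nil => exact absurd (Or.inl rfl) hnd
  | cons hd t =>
    obtain ⟨c0, n0⟩ := hd
    have hne : n0 ≠ -1 := fun h => hnd (Or.inr (by simp [h]))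
    have hbeq : ((-1 : Int) == n0) = false := beq_eq_false_iff_ne.mpr (Ne.symm hne)
    have hgs : pvGrp n0 [c0] t ≠ [] := pvGrp_ne_nil t n0 [c0]
    -- B's value is the rendering of the groups
    have hB : generate_ranking_text_alt ((c0, n0) :: t)
        = PySem.Str.join "" (grtLines 1 (pvGrp n0 [c0] t)) := by
      simp only [generate_ranking_text_alt, List.foldl_cons]
      have h0 : grtStepB [] (c0, n0) = [] ++ [(n0, [c0])] := by simp [grtStepB]
      rw [h0, pvFoldB]
      simp
    -- A's accumulated ranking string
    have hrank : ((((c0, n0) :: t).foldl grtStepA (0, "<li>", false, -1)).2.1)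
        = "<li>" ++ pvRender 0 (pvGrp n0 [c0] t) := by
      rw [List.foldl_cons]
      have hstep : grtStepA (0, "<li>", false, -1) (c0, n0)
          = (1, "<li>" ++ "</li>\n<li>" ++ PySem.Int.toStr 1 ++ "位 " ++ PySem.Int.toStr n0 ++ "人 " ++ c0, false, n0) := by
        simp [grtStepA, hbeq]
      rw [hstep, pvFoldA]
      have hcr := pvCanon_render t 0 n0 [c0] (by simp)
      norm_num at hcr
      rw [← hcr]
      simp [pvHdr, pvBody, pvJoin_single, ← String.append_assoc]
    obtain ⟨Z, hZ⟩ := pvRender_head (pvGrp n0 [c0] t) 0 hgs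
    have hAv : generate_ranking_text ((c0, n0) :: t) = Z ++ "</li>" := by
      simp only [generate_ranking_text]
      rw [hrank, hZ, pvSlice9]
    have hlines := pvRender_lines (pvGrp n0 [c0] t) 0 hgs
    norm_num at hlines
    rw [hZ, String.append_assoc] at hlines
    have hcore := pvStrCancel "</li>" _ _ hlines
    rw [hAv, hB, hcore]

theorem generate_ranking_text_changed : Claim_changed_generate_ranking_text := by
  unfold Claim_changed_generate_ranking_text; decide
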